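-- pv_equiv track=rewrite | github.com/ckoons/BubbleSpacetimeTheory | play/toy_selberg_bridge.py | chern_coefficients
-- ===== SOURCE A (Python) =====
-- from math import comb, factorial, pi, sqrt
--
-- def chern_coefficients(n):
--     """
--     Compute Chern class coefficients c_0, c_1, ..., c_n for Q^n.
--
--     c(Q^n) = (1+h)^(n+2) / (1+2h)
--
--     Expanding: c_k = sum_{j=0}^{k} C(n+2, k-j) * (-2)^j
--     """
--     coeffs = [1]  # c_0 = 1
--     for k in range(1, n + 1):
--         ck = 0
--         for j in range(k + 1):
--             ck += comb(n + 2, k - j) * ((-2) ** j)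
--         coeffs.append(ck)
--     return coeffs
-- ===== SOURCE B (Python) =====
-- def chern_coefficients(n):
--     # c_0 = 1; c_k = C(n+2, k) - 2*c_{k-1}, with C(n+2, k) maintained incrementally.
--     coeffs = [1]
--     binom = 1  # C(n+2, 0)
--     c = 1
--     for k in range(1, n + 1):
--         binom = binom * (n + 3 - k) // k  # C(n+2, k); division is exact
--         c = binom - 2 * c
--         coeffs.append(c)
--     return coeffs
-- ===== Notes on version B (the rewrite author's own statement) =====
-- stated objective: faster
-- what changed: Replaces the double loop summing C(n+2,k-j)*(-2)^j with the linear recurrence c_k = C(n+2,k) - 2*c_{k-1}, maintaining the binomial coefficient incrementally.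
import Mathlib
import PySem

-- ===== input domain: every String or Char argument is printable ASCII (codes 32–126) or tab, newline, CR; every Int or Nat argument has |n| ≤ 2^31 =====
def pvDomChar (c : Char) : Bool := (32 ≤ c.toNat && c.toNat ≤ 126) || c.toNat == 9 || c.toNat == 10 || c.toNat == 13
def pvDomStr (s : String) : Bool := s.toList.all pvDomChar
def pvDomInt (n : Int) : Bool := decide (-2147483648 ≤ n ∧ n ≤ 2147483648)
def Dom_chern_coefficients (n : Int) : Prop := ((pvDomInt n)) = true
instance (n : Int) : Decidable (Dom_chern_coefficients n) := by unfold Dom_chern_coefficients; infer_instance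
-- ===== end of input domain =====

-- B replaces A's O(n^2) double sum by the linear recurrence c_k = C(n+2,k) - 2*c_{k-1}
-- with an incrementally maintained binomial coefficient (objective: faster).

-- ===== PORT A =====
-- math.comb(m, k); exact for the only calls A makes (0 ≤ m, 0 ≤ k; k > m gives 0)
def pycomb (m k : Int) : Int := (m.toNat.choose k.toNat : Int)

def chern_coefficients (n : Int) : List Int :=
  (PySem.List.pyRange 1 (n + 1) 1).foldl
    (fun coeffs k =>
      coeffs ++ [(PySem.List.pyRange 0 (k + 1) 1).foldl
        (fun ck j => ck + pycomb (n + 2) (k - j) * (-2) ^ j.toNat) 0])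
    [1]

-- ===== PORT B =====
def chern_coefficients_alt (n : Int) : List Int :=
  ((PySem.List.pyRange 1 (n + 1) 1).foldl
    (fun (st : List Int × Int × Int) k =>
      let binom := PySem.Int.floordiv (st.2.1 * (n + 3 - k)) k
      let c := binom - 2 * st.2.2
      (st.1 ++ [c], binom, c))
    ([1], 1, 1)).1

-- ===== PRECONDITION & SPEC =====
def Spec_chern_coefficients (n : Int) (out : List Int) : Prop := out = chern_coefficients_alt n
instance (n : Int) (out : List Int) : Decidable (Spec_chern_coefficients n out) := by unfold Spec_chern_coefficients; infer_instance

-- ===== CLAIM (what is proved, stated in full; the proofs are below) =====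
def Claim_equal_chern_coefficients : Prop := ∀ (n : Int), Dom_chern_coefficients n → Spec_chern_coefficients n (chern_coefficients n)

-- ===== LEMMAS AND PROOFS =====

-- reference sequence: cref n k = intended c_k
def cref (n : Int) : Nat → Int
  | 0 => 1
  | k + 1 => ((n + 2).toNat.choose (k + 1) : Int) - 2 * cref n k

lemma foldl_append_map {α β : Type} (g : α → β) :
    ∀ (l : List α) (init : List β),
      l.foldl (fun acc k => acc ++ [g k]) init = init ++ l.map g := by
  intro l
  induction l with
  | nil => simp
  | cons x xs ih => intro init; simp [List.foldl_cons, ih]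

lemma foldl_add_map (g : Int → Int) :
    ∀ (l : List Int) (init : Int),
      l.foldl (fun a x => a + g x) init = init + (l.map g).sum := by
  intro l
  induction l with
  | nil => simp
  | cons x xs ih => intro init; simp [List.foldl_cons, ih]; ring

-- A's inner loop value at k = i+1 equals the sum T
lemma sum_map_range (f : Nat → Int) : ∀ (n : Nat),
    ((List.range n).map f).sum = ∑ j ∈ Finset.range n, f j := by
  intro n
  induction n with
  | zero => simp
  | succ n ih =>
    rw [List.range_succ, List.map_append, List.sum_append, Finset.sum_range_succ, ih]
    simp

lemma inner_sum_eq (n : Int) (i : Nat) :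
    (PySem.List.pyRange 0 ((i : Int) + 1 + 1) 1).foldl
      (fun ck j => ck + pycomb (n + 2) ((i : Int) + 1 - j) * (-2) ^ j.toNat) 0
    = ∑ j ∈ Finset.range (i + 2), ((n + 2).toNat.choose (i + 1 - j) : Int) * (-2) ^ j := by
  have h : ((i : Int) + 1 + 1) = ((i + 2 : Nat) : Int) := by push_cast; ring
  rw [h, PySem.List.pyRange_zero_nat, foldl_add_map, zero_add, List.map_map, sum_map_range]
  apply Finset.sum_congr rfl
  intro j hj
  have hj' : j < i + 2 := Finset.mem_range.mp hj
  have h1 : ((i : Int) + 1 - ((j : Nat) : Int)).toNat = i + 1 - j := by omega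
  simp only [Function.comp, pycomb, Int.toNat_natCast, h1]

-- the sum satisfies the recurrence, hence equals cref
lemma sum_eq_cref (n : Int) : ∀ (k : Nat),
    (∑ j ∈ Finset.range (k + 1), ((n + 2).toNat.choose (k - j) : Int) * (-2) ^ j) = cref n k := by
  intro k
  induction k with
  | zero => simp [cref]
  | succ k ih =>
    rw [Finset.sum_range_succ']
    simp only [Nat.succ_sub_succ]
    have : (∑ j ∈ Finset.range (k + 1), ((n + 2).toNat.choose (k - j) : Int) * (-2) ^ (j + 1))
        = (-2) * ∑ j ∈ Finset.range (k + 1), ((n + 2).toNat.choose (k - j) : Int) * (-2) ^ j := by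
      rw [Finset.mul_sum]; apply Finset.sum_congr rfl; intro j _; ring
    rw [this, ih]
    simp [cref]
    ring

-- incremental binomial step: C(M,m) * (M - m) // (m+1) = C(M,m+1), as Ints, for n ≥ 0
lemma binom_step (n : Int) (hn : 0 ≤ n) (m : Nat) :
    PySem.Int.floordiv (((n + 2).toNat.choose m : Int) * (n + 3 - ((m : Int) + 1))) ((m : Int) + 1)
      = ((n + 2).toNat.choose (m + 1) : Int) := by
  set M := (n + 2).toNat with hM
  have hMn : (M : Int) = n + 2 := by omega
  have key : ((M.choose m : Int)) * (n + 3 - ((m : Int) + 1)) = (M.choose (m + 1) : Int) * ((m : Int) + 1) := by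
    have h := Nat.choose_succ_right_eq M m
    by_cases hm : m < M
    · have h2 : (n + 3 - ((m : Int) + 1)) = ((M - m : Nat) : Int) := by omega
      rw [h2]
      exact_mod_cast h.symm
    · have h1 : M.choose (m + 1) = 0 := Nat.choose_eq_zero_of_lt (by omega)
      by_cases hm2 : m ≤ M
      · have hz : (n + 3 - ((m : Int) + 1)) = 0 := by omega
        simp [hz, h1]
      · have h0 : M.choose m = 0 := Nat.choose_eq_zero_of_lt (by omega)
        simp [h0, h1]
  rw [key]
  have hpos : (0 : Int) < (m : Int) + 1 := by positivity
  rw [PySem.Int.floordiv_eq_ediv_of_pos hpos, Int.mul_ediv_cancel _ (by omega)]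

-- B's loop invariant
lemma b_inv (n : Int) (hn : 0 ≤ n) : ∀ (m : Nat),
    (PySem.List.pyRange 1 ((m : Int) + 1) 1).foldl
      (fun (st : List Int × Int × Int) k =>
        let binom := PySem.Int.floordiv (st.2.1 * (n + 3 - k)) k
        let c := binom - 2 * st.2.2
        (st.1 ++ [c], binom, c))
      ([1], 1, 1)
    = ([1] ++ (List.range m).map (fun i => cref n (i + 1)),
       ((n + 2).toNat.choose m : Int), cref n m) := by
  intro m
  induction m with
  | zero =>
    rw [PySem.List.pyRange_one_eq_nil (by omega)]
    simp [cref]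
  | succ m ih =>
    have hsplit : PySem.List.pyRange 1 (((m + 1 : Nat) : Int) + 1) 1
        = PySem.List.pyRange 1 ((m : Int) + 1) 1 ++ [(m : Int) + 1] := by
      have : ((m + 1 : Nat) : Int) + 1 = ((m : Int) + 1) + 1 := by push_cast; ring
      rw [this, PySem.List.pyRange_one_succ_right (by omega)]
    rw [hsplit, List.foldl_append, ih]
    simp only [List.foldl_cons, List.foldl_nil]
    rw [binom_step n hn m]
    have hc : ((n + 2).toNat.choose (m + 1) : Int) - 2 * cref n m = cref n (m + 1) := by
      simp [cref]
    rw [hc]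
    simp [List.range_succ]

theorem chern_equal (n : Int) : chern_coefficients n = chern_coefficients_alt n := by
  by_cases hn : 0 ≤ n
  · unfold chern_coefficients chern_coefficients_alt
    have hend : n + 1 = (n.toNat : Int) + 1 := by omega
    rw [hend, b_inv n hn n.toNat, foldl_append_map]
    have hlen : ((n.toNat : Int) + 1 - 1).toNat = n.toNat := by omega
    rw [PySem.List.pyRange_one, hlen, List.map_map]
    congr 1
    apply List.map_congr_left
    intro i hi
    simp only [Function.comp_apply]
    rw [show (1 : Int) + (i : Int) = (i : Int) + 1 from by ring]
    rw [inner_sum_eq n i, sum_eq_cref n (i + 1)]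
  · unfold chern_coefficients chern_coefficients_alt
    rw [PySem.List.pyRange_one_eq_nil (by omega)]
    simp

-- ===== VERDICT (by name: the statement is the Claim_ definition above) =====
theorem chern_coefficients_spec : Claim_equal_chern_coefficients := by
  intro n _
  exact chern_equal n
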